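-- pv_equiv track=rewrite | github.com/shellphish/artiphishell | components/discoveryguy/src/discoveryguy/toolbox/peek_dbg.py | _list_to_intervals
-- ===== SOURCE A (Python) =====
-- def _list_to_intervals(lst):
--     if not lst:
--         return []
--
--     lst = sorted(lst)
--     intervals = []
--     start = prev = lst[0]
--
--     for num in lst[1:]:
--         if num == prev + 1:
--             prev = num
--         else:
--             if start == prev:
--                 intervals.append(f"{start}")
--             else:
--                 intervals.append(f"{start}-{prev}")
--             start = prev = num
--
--     # Add the last interval
--     if start == prev:
--         intervals.append(f"{start}")
--     else:
--         intervals.append(f"{start}-{prev}")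
--
--     return intervals
-- ===== SOURCE B (Python) =====
-- from itertools import groupby
--
--
-- def _list_to_intervals(lst):
--     if not lst:
--         return []
--     out = []
--     for _, grp in groupby(enumerate(sorted(lst)), key=lambda p: p[1] - p[0]):
--         g = [v for _, v in grp]
--         out.append(f"{g[0]}" if g[0] == g[-1] else f"{g[0]}-{g[-1]}")
--     return out
-- ===== Notes on version B (the rewrite author's own statement) =====
-- stated objective: idiomatic
-- what changed: Replaced the manual start/prev run-tracking loop by itertools.groupby over enumerate(sorted(lst)) keyed on value - index, formatting each maximal consecutive run from its first and last element.
import Mathlib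
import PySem

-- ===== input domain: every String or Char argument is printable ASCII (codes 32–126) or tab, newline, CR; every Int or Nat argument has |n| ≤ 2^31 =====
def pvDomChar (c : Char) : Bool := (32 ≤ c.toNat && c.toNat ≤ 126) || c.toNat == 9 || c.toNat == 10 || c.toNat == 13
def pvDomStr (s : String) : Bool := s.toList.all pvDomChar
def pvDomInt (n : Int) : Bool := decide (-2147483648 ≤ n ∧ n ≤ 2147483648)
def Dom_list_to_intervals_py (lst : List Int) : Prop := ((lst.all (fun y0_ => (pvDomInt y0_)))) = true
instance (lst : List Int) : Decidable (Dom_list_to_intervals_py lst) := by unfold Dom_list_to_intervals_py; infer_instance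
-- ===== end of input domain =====

-- B replaces A's manual start/prev bookkeeping by grouping enumerate(sorted(lst)) on the key
-- value - index (itertools.groupby) and formatting each maximal consecutive run; objective: idiomatic.


-- ===== PORT A =====
-- A's interval formatting: f"{start}" if start == prev else f"{start}-{prev}"
def pvFmtA (start prev : Int) : String :=
  if start = prev then PySem.Int.toStr start
  else PySem.Int.toStr start ++ "-" ++ PySem.Int.toStr prev

-- A's for-loop over lst[1:] with state (intervals, start, prev), plus the trailing append
def pvLoopA (intervals : List String) (start prev : Int) : List Int → List String
  | [] => intervals ++ [pvFmtA start prev]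
  | num :: rest =>
      if num = prev + 1 then pvLoopA intervals start num rest
      else pvLoopA (intervals ++ [pvFmtA start prev]) num num rest

def list_to_intervals_py (lst : List Int) : List String :=
  if lst = [] then []
  else
    match PySem.List.sorted lst (fun x => x) false with
    | [] => []              -- unreachable: sorted of a nonempty list is nonempty
    | x :: rest => pvLoopA [] x x rest

-- ===== PORT B =====
-- itertools.groupby on (index, value) pairs with key p[1] - p[0] (adjacent equal keys form a group)
def pvGroupBy : List (Int × Int) → List (List (Int × Int))
  | [] => []
  | p :: ps =>
      match pvGroupBy ps with
      | (q :: g) :: gs =>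
          if p.2 - p.1 = q.2 - q.1 then (p :: q :: g) :: gs else [p] :: (q :: g) :: gs
      | _ => [[p]]

-- str(g[0]) if g[0] == g[-1] else f"{g[0]}-{g[-1]}" on the group's values
def pvFmtGroup : List (Int × Int) → String
  | [] => ""                -- unreachable: groupby groups are nonempty
  | p :: g =>
      if p.2 = (g.getLastD p).2 then PySem.Int.toStr p.2
      else PySem.Int.toStr p.2 ++ "-" ++ PySem.Int.toStr (g.getLastD p).2

def list_to_intervals_py_alt (lst : List Int) : List String :=
  if lst = [] then []
  else (pvGroupBy (PySem.List.enumerate (PySem.List.sorted lst (fun x => x) false))).map pvFmtGroup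

-- ===== PRECONDITION & SPEC =====
def Spec_list_to_intervals_py (lst : List Int) (out : List String) : Prop := out = list_to_intervals_py_alt lst
instance (lst : List Int) (out : List String) : Decidable (Spec_list_to_intervals_py lst out) := by unfold Spec_list_to_intervals_py; infer_instance

-- ===== CLAIM (what is proved, stated in full; the proofs are below) =====
def Claim_equal_list_to_intervals_py : Prop := ∀ (lst : List Int), Dom_list_to_intervals_py lst → Spec_list_to_intervals_py lst (list_to_intervals_py lst)

-- ===== LEMMAS AND PROOFS =====

-- formatting where the head group's start is overridden (A is mid-run: start ≤ current value)
def pvFmtHead (start : Int) : List (List (Int × Int)) → List String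
  | (p :: g) :: gs => pvFmtA start (g.getLastD p).2 :: gs.map pvFmtGroup
  | _ => []

-- A's loop only ever appends to the accumulator
theorem pvLoopA_acc (xs : List Int) : ∀ (acc : List String) (start prev : Int),
    pvLoopA acc start prev xs = acc ++ pvLoopA [] start prev xs := by
  induction xs with
  | nil => intro acc s p; simp [pvLoopA]
  | cons n ns ih =>
      intro acc s p
      simp only [pvLoopA]
      by_cases h : n = p + 1
      · rw [if_pos h, if_pos h]; exact ih acc s n
      · rw [if_neg h, if_neg h, ih (acc ++ [pvFmtA s p]), ih ([] ++ [pvFmtA s p])]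
        simp

-- one-step equation for pvGroupBy when the tail's groups are known
theorem pvGroupBy_cons (p q : Int × Int) (ps : List (Int × Int)) (g : List (Int × Int))
    (gs : List (List (Int × Int))) (h : pvGroupBy ps = (q :: g) :: gs) :
    pvGroupBy (p :: ps)
      = if p.2 - p.1 = q.2 - q.1 then (p :: q :: g) :: gs else [p] :: (q :: g) :: gs := by
  simp only [pvGroupBy]
  rw [h]

-- the head group of groupby on enumerate-from-i of (x :: xs) starts with (i, x)
theorem pvGroupBy_head (xs : List Int) : ∀ (i x : Int),
    ∃ g gs, pvGroupBy (PySem.List.enumerate (x :: xs) i) = ((i, x) :: g) :: gs := by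
  induction xs with
  | nil => intro i x; exact ⟨[], [], by simp [PySem.List.enumerate_cons, PySem.List.enumerate_nil, pvGroupBy]⟩
  | cons n ns ih =>
      intro i x
      obtain ⟨g, gs, h⟩ := ih (i + 1) n
      rw [PySem.List.enumerate_cons, pvGroupBy_cons (i, x) (i + 1, n) _ g gs h]
      by_cases hk : x - i = n - (i + 1)
      · exact ⟨(i + 1, n) :: g, gs, by simp [hk]⟩
      · exact ⟨[], ((i + 1, n) :: g) :: gs, by simp [hk]⟩

-- pvFmtGroup of a group is pvFmtA of its first and last values
theorem pvFmtGroup_eq (p : Int × Int) (g : List (Int × Int)) :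
    pvFmtGroup (p :: g) = pvFmtA p.2 (g.getLastD p).2 := by
  simp [pvFmtGroup, pvFmtA]

-- CORE: A's loop from state (start, prev = x) equals B's groups of enumerate-from-i of (x :: xs),
-- with the head group's start overridden by A's start
theorem pvMain (xs : List Int) : ∀ (i x start : Int),
    pvLoopA [] start x xs = pvFmtHead start (pvGroupBy (PySem.List.enumerate (x :: xs) i)) := by
  induction xs with
  | nil =>
      intro i x s
      simp [pvLoopA, PySem.List.enumerate_cons, PySem.List.enumerate_nil, pvGroupBy, pvFmtHead]
  | cons n ns ih =>
      intro i x s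
      obtain ⟨g, gs, hgb⟩ := pvGroupBy_head ns (i + 1) n
      rw [PySem.List.enumerate_cons, pvGroupBy_cons (i, x) (i + 1, n) _ g gs hgb]
      simp only [pvLoopA]
      by_cases h : n = x + 1
      · have hk : x - i = n - (i + 1) := by omega
        rw [if_pos h, if_pos (by simpa using hk), ih (i + 1) n s, hgb]
        cases g with
        | nil => simp [pvFmtHead]
        | cons a l =>
            rcases hl : (a :: l).getLast? with _ | b
            · simp at hl
            · simp [pvFmtHead, hl]
      · have hk : ¬ (x - i = n - (i + 1)) := by omega
        rw [if_neg h, if_neg (by simpa using hk), pvLoopA_acc, ih (i + 1) n n, hgb]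
        simp [pvFmtHead, pvFmtGroup_eq]

-- ===== VERDICT (by name: the statement is the Claim_ definition above) =====
theorem list_to_intervals_py_spec : Claim_equal_list_to_intervals_py := by
  intro lst _
  unfold Spec_list_to_intervals_py list_to_intervals_py list_to_intervals_py_alt
  by_cases hnil : lst = []
  · simp [hnil]
  · rw [if_neg hnil, if_neg hnil]
    rcases hs : PySem.List.sorted lst (fun x => x) false with _ | ⟨x, rest⟩
    · exact absurd ((PySem.List.sorted_eq_nil_iff lst (fun x => x) false).mp hs) hnil
    · show pvLoopA [] x x rest = _
      obtain ⟨g, gs, hgb⟩ := pvGroupBy_head rest 0 x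
      rw [pvMain rest 0 x x, hgb]
      simp [pvFmtHead, pvFmtGroup_eq]
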